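-- pv_equiv track=rewrite | github.com/rasmusthog/nafuma | nafuma/dft/electrons.py | get_interactions_involving
-- ===== SOURCE A (Python) =====
-- def get_interactions_involving(interactions, targets):
--     ''' Get the indicies (+1) of all the interactions involving target. This list can be used as input to plot_coop(), as it is
--     then formatted the way that function accepts these interactions.
--
--     Input:
--     interactions: list of interactions as output from read_coop()
--     target: the particular atom that should be involved in the interactions contained in the output list
--
--     Output:
--     target_interactions: Indices (+1) of all the interactions involving target atom.'''
--
--     target_interactions = []
--     appended_interactions = []
--
--
--     if type(targets) == list:
--         for target in targets:
--             for ind, interaction in enumerate(interactions):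
--                 if target in interaction.split('->') and interaction not in appended_interactions:
--                     target_interactions.append(ind+1)
--                     appended_interactions.append(interaction)
--
--     else:
--         for ind, interaction in enumerate(interactions):
--             if targets in interaction.split('->'):
--                 target_interactions.append(ind+1)
--
--
--     return target_interactions
-- ===== SOURCE B (Python) =====
-- def get_interactions_involving(interactions, targets):
--     if type(targets) == list:
--         # Build an inverted index: atom -> list of (ind, interaction), in interaction order.
--         entries = [(part, (ind, interaction)) for ind, interaction in enumerate(interactions)
--                    for part in dict.fromkeys(interaction.split('->'))]
--         index = {}
--         for key, pair in entries:
--             index.setdefault(key, []).append(pair)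
--         target_interactions = []
--         seen = set()
--         for target in targets:
--             for ind, interaction in index.get(target, []):
--                 if interaction not in seen:
--                     target_interactions.append(ind + 1)
--                     seen.add(interaction)
--         return target_interactions
--     else:
--         return [ind + 1 for ind, interaction in enumerate(interactions)
--                 if targets in interaction.split('->')]
-- ===== Notes on version B (the rewrite author's own statement) =====
-- stated objective: faster
-- what changed: B builds an inverted index (atom -> list of (index, interaction) pairs) in one pass and answers each target by a dict lookup with a seen-set for dedup, instead of A's full scan of interactions per target with a linear 'not in list' membership test.
import Mathlib
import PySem

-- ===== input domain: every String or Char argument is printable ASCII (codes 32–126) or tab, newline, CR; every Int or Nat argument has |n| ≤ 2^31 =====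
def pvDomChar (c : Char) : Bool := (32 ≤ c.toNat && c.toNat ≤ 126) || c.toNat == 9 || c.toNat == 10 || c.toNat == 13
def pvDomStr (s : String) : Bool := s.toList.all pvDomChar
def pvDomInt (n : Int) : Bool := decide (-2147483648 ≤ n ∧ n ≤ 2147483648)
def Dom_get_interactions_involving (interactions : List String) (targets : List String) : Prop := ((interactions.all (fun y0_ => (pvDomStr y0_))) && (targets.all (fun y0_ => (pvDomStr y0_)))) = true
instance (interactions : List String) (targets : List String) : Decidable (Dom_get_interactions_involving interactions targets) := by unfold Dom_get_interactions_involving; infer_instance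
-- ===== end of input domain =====

-- One honest line: B replaces A's per-target full scans over `interactions` with an
-- inverted index built once (atom -> (index, interaction) pairs) plus a seen-set; faster.
-- `targets : List String` means Python's `type(targets) == list` branch is always taken.

-- ===== PORT A =====
-- s.split('->'): the separator is nonempty, so PySem.Str.split? is always `some`; exact.
def pvSplit (s : String) : List String := (PySem.Str.split? s "->").getD []

def get_interactions_involving (interactions : List String) (targets : List String) : List Int :=
  -- targets is a list here, so the `type(targets) == list` branch is the one ported
  (targets.foldl (fun (st : List Int × List String) target =>
      (PySem.List.enumerate interactions 0).foldl (fun st e =>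
        if (pvSplit e.2).contains target && !(st.2.contains e.2)
        then (st.1 ++ [e.1 + 1], st.2 ++ [e.2])
        else st) st)
    ([], [])).1

-- ===== PORT B =====
def get_interactions_involving_alt (interactions : List String) (targets : List String) : List Int :=
  let entries := (PySem.List.enumerate interactions 0).flatMap
      (fun e => (PySem.List.dedup (pvSplit e.2)).map (fun p => (p, e)))
  let index := entries.foldl (fun d p => d.modify p.1 [] (· ++ [p.2]))
      (PySem.Dict.empty : PySem.Dict String (List (Int × String)))
  (targets.foldl (fun (st : List Int × PySem.Set String) target =>
      (index.getD target []).foldl (fun st e =>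
        if st.2.contains e.2 then st
        else (st.1 ++ [e.1 + 1], PySem.Set.add st.2 e.2)) st)
    ([], PySem.Set.empty)).1

-- ===== PRECONDITION & SPEC =====
def Spec_get_interactions_involving (interactions : List String) (targets : List String) (out : List Int) : Prop := out = get_interactions_involving_alt interactions targets
instance (interactions : List String) (targets : List String) (out : List Int) : Decidable (Spec_get_interactions_involving interactions targets out) := by unfold Spec_get_interactions_involving; infer_instance

-- ===== CLAIM (what is proved, stated in full; the proofs are below) =====
def Claim_equal_get_interactions_involving : Prop := ∀ (interactions : List String) (targets : List String), Dom_get_interactions_involving interactions targets → Spec_get_interactions_involving interactions targets (get_interactions_involving interactions targets)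

-- ===== LEMMAS AND PROOFS =====

-- A Nodup list filtered for equality with t is [t] or [] depending on membership.
theorem pv_filter_nodup_eq {xs : List String} (h : xs.Nodup) (t : String) :
    xs.filter (fun p => p == t) = if xs.contains t then [t] else [] := by
  induction xs with
  | nil => simp
  | cons x xs ih =>
    rcases List.nodup_cons.mp h with ⟨hx, hnd⟩
    rw [List.filter_cons]
    by_cases hxt : x = t
    · subst hxt
      have h1 : xs.filter (fun p => p == x) = [] :=
        List.filter_eq_nil_iff.mpr (fun a ha hax => hx ((eq_of_beq hax) ▸ ha))
      simp [h1]
    · have hbx : (x == t) = false := by simp [hxt]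
      simp only [hbx, Bool.false_eq_true, if_false, ih hnd, List.contains_cons]
      have hne : ¬ t = x := fun h => hxt h.symm
      by_cases hm : t ∈ xs <;> simp [hm, hne]

-- The inverted-index entries, filtered on key t, recover exactly the enumerate-filter A scans.
theorem pv_entries_filter (l : List (Int × String)) (t : String) :
    ((l.flatMap (fun e => (PySem.List.dedup (pvSplit e.2)).map (fun p => (p, e)))).filter
        (fun p => p.1 == t)).map (·.2)
      = l.filter (fun e => (pvSplit e.2).contains t) := by
  induction l with
  | nil => simp
  | cons e l ih =>
    simp only [List.flatMap_cons, List.filter_append, List.map_append, ih, List.filter_cons]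
    rw [List.filter_map]
    simp only [Function.comp_def]
    rw [pv_filter_nodup_eq (PySem.List.nodup_dedup (pvSplit e.2)) t]
    have hmem : (PySem.List.dedup (pvSplit e.2)).contains t = (pvSplit e.2).contains t := by
      by_cases hm : t ∈ pvSplit e.2 <;> simp [hm]
    rw [hmem]
    by_cases hm : t ∈ pvSplit e.2 <;> simp [hm]

-- Fusing a pure guard into the list: fold with guard P ∧ Q = fold of filter P with guard Q.
theorem pv_guard_fuse {α σ : Type} (P : α → Bool) (Q : σ → α → Bool) (f : σ → α → σ)
    (l : List α) (st : σ) :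
    l.foldl (fun st e => if P e && Q st e then f st e else st) st
      = (l.filter P).foldl (fun st e => if Q st e then f st e else st) st := by
  induction l generalizing st with
  | nil => rfl
  | cons x l ih =>
    rw [List.filter_cons]
    cases hp : P x
    · simp only [List.foldl_cons, hp, Bool.false_and, Bool.false_eq_true, if_false,
        Bool.false_eq_true, if_false, ih]
    · cases hq : Q st x <;>
        simp only [List.foldl_cons, hp, hq, Bool.true_and, Bool.false_eq_true, if_false,
          if_true, ih]

-- ===== VERDICT (by name: the statement is the Claim_ definition above) =====
theorem get_interactions_involving_spec : Claim_equal_get_interactions_involving := by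
  intro interactions targets _
  unfold Spec_get_interactions_involving get_interactions_involving get_interactions_involving_alt
  simp only []
  have hidx : ∀ t : String,
      (((PySem.List.enumerate interactions 0).flatMap
          (fun e => (PySem.List.dedup (pvSplit e.2)).map (fun p => (p, e)))).foldl
        (fun d p => d.modify p.1 [] (· ++ [p.2]))
        (PySem.Dict.empty : PySem.Dict String (List (Int × String)))).getD t []
      = (PySem.List.enumerate interactions 0).filter
          (fun e => (pvSplit e.2).contains t) := by
    intro t
    rw [PySem.Dict.getD_foldl_modify_append]
    simpa using pv_entries_filter (PySem.List.enumerate interactions 0) t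
  congr 1
  apply PySem.List.foldl_congr_mem
  intro st target _
  rw [hidx target]
  refine (pv_guard_fuse (fun e : Int × String => (pvSplit e.2).contains target)
      (fun (st : List Int × List String) e => !(st.2.contains e.2))
      (fun st e => (st.1 ++ [e.1 + 1], st.2 ++ [e.2]))
      (PySem.List.enumerate interactions 0) st).trans ?_
  apply PySem.List.foldl_congr_mem
  intro st e _
  by_cases hm : e.2 ∈ st.2 <;> simp [PySem.Set.add, hm]
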